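-- pv_equiv track=rewrite | github.com/Terry20161226/lottery-ai-system | fc3d_strategy.py | analyze_fc3d_omission
-- ===== SOURCE A (Python) =====
-- def analyze_fc3d_omission(history, last_n=100):
--     """
--     分析福彩 3D 遗漏值（每个号码多少期未出现）
--     遗漏值 = 从最新一期开始，该号码多少期没有出现
--     """
--     if not history or len(history) == 0:
--         return {str(i): 0 for i in range(10)}
--
--     omission = {}
--
--     # 从最新一期开始往前统计，计算每个号码连续多少期未出现
--     for num in range(10):
--         num_str = str(num)
--         count = 0
--         for record in history[:last_n]:
--             numbers = record.get("numbers", [])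
--             if num in numbers:
--                 # 号码出现，停止计数
--                 break
--             else:
--                 # 号码未出现，计数 +1
--                 count += 1
--         omission[num_str] = count
--
--     return omission
-- ===== SOURCE B (Python) =====
-- def analyze_fc3d_omission(history, last_n=100):
--     """One forward pass over the recent records, recording each digit's
--     first-occurrence index; omission = first index (or number of records
--     scanned if the digit never appeared)."""
--     if not history:
--         return {str(i): 0 for i in range(10)}
--     recent = history[:last_n]
--     first = {}
--     for i, record in enumerate(recent):
--         for d in record.get("numbers", []):
--             if d not in first:
--                 first[d] = i
--     n = len(recent)
--     return {str(d): first.get(d, n) for d in range(10)}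
-- ===== Notes on version B (the rewrite author's own statement) =====
-- stated objective: alternative
-- what changed: Instead of A's ten separate scans of the recent history (one per digit, each stopping at the digit's first appearance), B does a single forward pass that records every digit's first-occurrence index in a dict, then reads each digit's omission off that dict, defaulting to the number of records scanned.
import Mathlib
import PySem

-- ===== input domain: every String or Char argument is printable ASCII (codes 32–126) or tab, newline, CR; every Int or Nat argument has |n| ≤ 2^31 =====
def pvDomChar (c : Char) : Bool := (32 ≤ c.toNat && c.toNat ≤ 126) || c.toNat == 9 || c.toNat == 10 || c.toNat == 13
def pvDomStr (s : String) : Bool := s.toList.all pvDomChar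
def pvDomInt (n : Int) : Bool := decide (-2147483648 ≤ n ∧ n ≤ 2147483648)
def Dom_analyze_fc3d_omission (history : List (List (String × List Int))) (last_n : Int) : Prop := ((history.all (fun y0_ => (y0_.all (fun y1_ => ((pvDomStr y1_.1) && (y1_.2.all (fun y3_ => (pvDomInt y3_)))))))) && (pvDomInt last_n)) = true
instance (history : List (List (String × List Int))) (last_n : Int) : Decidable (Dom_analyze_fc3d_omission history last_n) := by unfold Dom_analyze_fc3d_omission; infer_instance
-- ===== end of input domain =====

-- B replaces A's ten per-digit scans of the history by a single forward pass
-- recording first-occurrence indices in a dict (objective: alternative decomposition).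

-- ===== PORT A =====
-- A's inner loop: count records until `num` appears (break), else count them all
def pvCntA (num : Int) : List (List (String × List Int)) → Int
  | [] => 0
  | r :: rs =>
      if num ∈ PySem.Dict.getD (PySem.Dict.mk r) "numbers" [] then 0
      else 1 + pvCntA num rs

def analyze_fc3d_omission (history : List (List (String × List Int))) (last_n : Int) : List (String × Int) :=
  if history = [] then
    (PySem.List.pyRange 0 10 1).map (fun i => (PySem.Int.toStr i, (0 : Int)))
  else
    let recent := PySem.List.slice history none (some last_n)
    ((PySem.List.pyRange 0 10 1).foldl
      (fun (om : PySem.Dict String Int) num =>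
        om.insert (PySem.Int.toStr num) (pvCntA num recent))
      PySem.Dict.empty).items

-- ===== PORT B =====
-- B's single pass: first[d] = index of the first record containing d
def pvFirstB (recent : List (List (String × List Int))) : PySem.Dict Int Int :=
  (PySem.List.enumerate recent 0).foldl
    (fun f p =>
      (PySem.Dict.getD (PySem.Dict.mk p.2) "numbers" []).foldl
        (fun f d => if f.contains d then f else f.insert d p.1) f)
    PySem.Dict.empty

def analyze_fc3d_omission_alt (history : List (List (String × List Int))) (last_n : Int) : List (String × Int) :=
  if history = [] then
    (PySem.List.pyRange 0 10 1).map (fun i => (PySem.Int.toStr i, (0 : Int)))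
  else
    let recent := PySem.List.slice history none (some last_n)
    let first := pvFirstB recent
    let n : Int := recent.length
    (PySem.List.pyRange 0 10 1).map (fun d => (PySem.Int.toStr d, first.getD d n))

-- ===== PRECONDITION & SPEC =====
def Spec_analyze_fc3d_omission (history : List (List (String × List Int))) (last_n : Int) (out : List (String × Int)) : Prop := out = analyze_fc3d_omission_alt history last_n
instance (history : List (List (String × List Int))) (last_n : Int) (out : List (String × Int)) : Decidable (Spec_analyze_fc3d_omission history last_n out) := by unfold Spec_analyze_fc3d_omission; infer_instance

-- ===== CLAIM (what is proved, stated in full; the proofs are below) =====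
def Claim_equal_analyze_fc3d_omission : Prop := ∀ (history : List (List (String × List Int))) (last_n : Int), Dom_analyze_fc3d_omission history last_n → Spec_analyze_fc3d_omission history last_n (analyze_fc3d_omission history last_n)

-- ===== LEMMAS AND PROOFS =====

theorem pv_enum_cons (x : List (String × List Int)) (xs : List (List (String × List Int))) (s : Int) :
    PySem.List.enumerate (x :: xs) s = (s, x) :: PySem.List.enumerate xs (s + 1) := by
  simp [PySem.List.enumerate]

-- the inner fold of B: get? d is set to i if d is a fresh member of numbers, else untouched
theorem pv_inner (numbers : List Int) (f : PySem.Dict Int Int) (i d : Int) :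
    ((numbers.foldl (fun f d' => if f.contains d' then f else f.insert d' i) f).get? d)
      = if f.get? d = none ∧ d ∈ numbers then some i else f.get? d := by
  induction numbers generalizing f with
  | nil => simp
  | cons x xs ih =>
    simp only [List.foldl_cons]
    by_cases hc : f.contains x
    · simp only [hc, if_pos, ih]
      by_cases hdx : d = x
      · subst hdx
        rw [PySem.Dict.contains_eq_isSome_get?] at hc
        cases hg : f.get? d <;> simp [hg] at hc ⊢
      · simp [hdx]
    · simp only [hc, if_neg, Bool.not_eq_true, ih]
      rw [PySem.Dict.get?_insert (d := f) (k := x) (v := i) (k' := d)]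
      by_cases hdx : d = x
      · subst hdx
        rw [PySem.Dict.contains_eq_isSome_get?] at hc
        simp only [Bool.not_eq_true, Option.isSome_eq_false_iff, Option.isNone_iff_eq_none] at hc
        simp [hc]
      · simp [hdx]

-- the outer fold preserves an already-present value
theorem pv_outer_some (recent : List (List (String × List Int))) (s : Int)
    (f : PySem.Dict Int Int) (d j : Int) (h : f.get? d = some j) :
    ((PySem.List.enumerate recent s).foldl
      (fun f p =>
        (PySem.Dict.getD (PySem.Dict.mk p.2) "numbers" []).foldl
          (fun f d => if f.contains d then f else f.insert d p.1) f) f).get? d = some j := by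
  induction recent generalizing s f with
  | nil => simpa using h
  | cons r rs ih =>
    rw [pv_enum_cons]
    simp only [List.foldl_cons]
    exact ih (s + 1) _ (by rw [pv_inner]; simp [h])

-- for an absent key, the outer fold computes A's per-digit count (offset by the start index)
theorem pv_outer_none (recent : List (List (String × List Int))) (s : Int)
    (f : PySem.Dict Int Int) (d : Int) (h : f.get? d = none) :
    ((PySem.List.enumerate recent s).foldl
      (fun f p =>
        (PySem.Dict.getD (PySem.Dict.mk p.2) "numbers" []).foldl
          (fun f d => if f.contains d then f else f.insert d p.1) f) f).getD d (s + recent.length)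
      = s + pvCntA d recent := by
  induction recent generalizing s f with
  | nil => simp [PySem.Dict.getD_eq_get?_getD, h, pvCntA]
  | cons r rs ih =>
    rw [pv_enum_cons]
    simp only [List.foldl_cons]
    set f' := (PySem.Dict.getD (PySem.Dict.mk r) "numbers" []).foldl
          (fun f d' => if f.contains d' then f else f.insert d' s) f with hf'
    by_cases hm : d ∈ PySem.Dict.getD (PySem.Dict.mk r) "numbers" []
    · have hg : f'.get? d = some s := by rw [hf', pv_inner]; simp [h, hm]
      have hs := pv_outer_some rs (s+1) f' d s hg
      rw [PySem.Dict.getD_eq_get?_getD, hs]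
      simp [pvCntA, hm]
    · have h' : f'.get? d = none := by
        rw [hf', pv_inner]; simp [h, hm]
      have := ih (s + 1) f' h'
      rw [show s + (↑(r :: rs).length : Int) = (s + 1) + rs.length by simp; ring]
      rw [this]
      simp [pvCntA, hm]; ring

theorem pv_first_getD (recent : List (List (String × List Int))) (d : Int) :
    (pvFirstB recent).getD d (recent.length : Int) = pvCntA d recent := by
  have := pv_outer_none recent 0 PySem.Dict.empty d (by simp)
  simpa using this

-- ===== VERDICT (by name: the statement is the Claim_ definition above) =====
theorem analyze_fc3d_omission_spec : Claim_equal_analyze_fc3d_omission := by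
  intro history last_n _
  unfold Spec_analyze_fc3d_omission analyze_fc3d_omission analyze_fc3d_omission_alt
  by_cases h : history = []
  · simp [h]
  · simp only [h, reduceIte]
    rw [PySem.Dict.items_foldl_insert_fresh _ _ _ _ (by simp) (by decide)]
    simp only [PySem.Dict.empty, List.nil_append]
    exact List.map_congr_left (fun num _ => by rw [pv_first_getD])
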